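-- pv_equiv track=rewrite | github.com/ivan-sitnikoff/Tubingen | Ex06/ex_06.py | simple_tokenizer
-- ===== SOURCE A (Python) =====
-- def simple_tokenizer(th_dict, sentence):
--     """
--     Simple tokenizer, transliterator, part-of-speech tagger and glosser
--     that correctly analyses the example text based on the dictionary data.
--     """
--     i, word, translate = 0, '', []
--     while i < len(sentence):
--         word += sentence[i]
--         if word in th_dict:
--             translate.append((word, *th_dict[word]))
--             sentence = sentence[i + 1: ]
--             i, word = 0, ''
--         else:
--             i += 1
--     return translate
-- ===== SOURCE B (Python) =====
-- def simple_tokenizer(th_dict, sentence):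
--     """Greedy shortest-prefix tokenization: scan length-sorted dictionary keys
--     and advance a start pointer instead of growing a prefix char by char."""
--     keys = sorted((k for k in th_dict if k), key=len)
--     out = []
--     start = 0
--     n = len(sentence)
--     while start < n:
--         for k in keys:
--             if sentence.startswith(k, start):
--                 out.append((k, *th_dict[k]))
--                 start += len(k)
--                 break
--         else:
--             break
--     return out
-- ===== Notes on version B (the rewrite author's own statement) =====
-- stated objective: faster
-- what changed: B replaces A's character-by-character growing of a prefix (repeated string concatenation and a dict membership test on every growing prefix) by a start pointer over the fixed sentence scanned against the dictionary's non-empty keys sorted once by length ascending, taking the first (shortest) key that matches at the pointer.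
import Mathlib
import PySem

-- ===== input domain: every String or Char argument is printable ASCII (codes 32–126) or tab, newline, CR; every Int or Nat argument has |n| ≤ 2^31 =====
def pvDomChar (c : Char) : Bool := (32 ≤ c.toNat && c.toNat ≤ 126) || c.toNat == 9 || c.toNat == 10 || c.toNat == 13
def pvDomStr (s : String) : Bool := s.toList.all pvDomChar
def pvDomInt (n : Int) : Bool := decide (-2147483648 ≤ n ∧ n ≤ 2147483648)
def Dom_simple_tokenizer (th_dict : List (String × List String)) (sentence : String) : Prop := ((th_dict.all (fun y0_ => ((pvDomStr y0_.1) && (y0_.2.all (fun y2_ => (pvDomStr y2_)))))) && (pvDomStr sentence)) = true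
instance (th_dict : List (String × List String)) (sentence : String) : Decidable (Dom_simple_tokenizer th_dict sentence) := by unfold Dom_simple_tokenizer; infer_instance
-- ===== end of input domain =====

-- B replaces A's character-by-character prefix growing with a start pointer scanned
-- against the dictionary's non-empty keys sorted once by length ascending (objective: faster; measured).

-- dict lookup on the association list: first matching key (Python dict lookup)
def pvLookup (d : List (String × List String)) (w : List Char) : Option (List String) :=
  match d with
  | [] => none
  | (k, v) :: rest => if k.toList = w then some v else pvLookup rest w

-- ===== PORT A =====
-- A's while loop: i, word, translate; on a hit the sentence is cut to its suffix and i, word reset.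
def pvTokA (d : List (String × List String)) (s : List Char) (i : Nat) (word : List Char)
    (acc : List (List String)) : List (List String) :=
  if h : i < s.length then
    let word' := word ++ [s[i]]          -- word += sentence[i]
    match pvLookup d word' with           -- if word in th_dict
    | some vs => pvTokA d (s.drop (i + 1)) 0 [] (acc ++ [String.ofList word' :: vs])
    | none => pvTokA d s (i + 1) word' acc
  else acc
  termination_by s.length - i
  decreasing_by
  · simp only [List.length_drop]; omega
  · omega

def simple_tokenizer (th_dict : List (String × List String)) (sentence : String) : List (List String) :=
  pvTokA th_dict sentence.toList 0 [] []

-- ===== PORT B =====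
-- B's inner for/else: first length-sorted key matching at start; hk records that every key
-- in the sorted list is non-empty (Source B filters them out), which makes the loop terminate.
def pvTokB (d : List (String × List String)) (keys : List String)
    (hk : ∀ k ∈ keys, k.toList ≠ []) (s : List Char) (start : Nat)
    (acc : List (List String)) : List (List String) :=
  if h : start < s.length then
    match hf : keys.find? (fun k => PySem.Chars.startswith (s.drop start) k.toList) with
    | some k =>          -- sentence.startswith(k, start)
        pvTokB d keys hk s (start + k.toList.length)
          (acc ++ [k :: (pvLookup d k.toList).getD []])   -- th_dict[k]; k is a key of d
    | none => acc        -- for…else: break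
  else acc
  termination_by s.length - start
  decreasing_by
    have hm := List.mem_of_find?_eq_some hf
    have := hk k hm
    have : k.toList.length ≠ 0 := by simpa using this
    omega

def simple_tokenizer_alt (th_dict : List (String × List String)) (sentence : String) : List (List String) :=
  -- keys = sorted((k for k in th_dict if k), key=len)
  let keys := PySem.List.sorted ((th_dict.map Prod.fst).filter (fun k => !k.toList.isEmpty))
      (fun k => k.toList.length) false
  pvTokB th_dict keys
    (fun k hkm => by
      have : k ∈ (th_dict.map Prod.fst).filter (fun k => !k.toList.isEmpty) :=
        (PySem.List.mem_sorted _ _ _ _).mp hkm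
      have := (List.mem_filter.mp this).2
      simpa using this)
    sentence.toList 0 []

-- ===== PRECONDITION & SPEC =====
def Spec_simple_tokenizer (th_dict : List (String × List String)) (sentence : String) (out : List (List String)) : Prop := out = simple_tokenizer_alt th_dict sentence
instance (th_dict : List (String × List String)) (sentence : String) (out : List (List String)) : Decidable (Spec_simple_tokenizer th_dict sentence out) := by unfold Spec_simple_tokenizer; infer_instance

-- ===== CLAIM (what is proved, stated in full; the proofs are below) =====
def Claim_equal_simple_tokenizer : Prop := ∀ (th_dict : List (String × List String)) (sentence : String), Dom_simple_tokenizer th_dict sentence → Spec_simple_tokenizer th_dict sentence (simple_tokenizer th_dict sentence)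

-- ===== LEMMAS AND PROOFS =====

-- the least j with i < j ≤ s.length whose prefix s.take j is a dictionary key
def pvFirst (d : List (String × List String)) (s : List Char) (i : Nat) : Option Nat :=
  if h : i < s.length then
    match pvLookup d (s.take (i + 1)) with
    | some _ => some (i + 1)
    | none => pvFirst d s (i + 1)
  else none
  termination_by s.length - i

theorem pvFirst_some_spec (d : List (String × List String)) (s : List Char) (i j : Nat)
    (h : pvFirst d s i = some j) :
    i < j ∧ j ≤ s.length ∧ (pvLookup d (s.take j)).isSome ∧
      ∀ m, i < m → m < j → pvLookup d (s.take m) = none := by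
  fun_induction pvFirst d s i with
  | case1 i h1 v hv => simp at h; subst h; refine ⟨by omega, by omega, by simp [hv], ?_⟩; omega
  | case2 i h1 hv ih =>
      obtain ⟨a1, a2, a3, a4⟩ := ih h
      refine ⟨by omega, a2, a3, ?_⟩
      intro m hm1 hm2
      rcases Nat.eq_or_lt_of_le (Nat.succ_le_of_lt hm1) with he | hl
      · rw [← he]; exact hv
      · exact a4 m hl hm2
  | case3 i h1 => simp [pvFirst, h1] at h

theorem pvFirst_none_spec (d : List (String × List String)) (s : List Char) (i : Nat)
    (h : pvFirst d s i = none) :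
    ∀ m, i < m → m ≤ s.length → pvLookup d (s.take m) = none := by
  fun_induction pvFirst d s i with
  | case1 i h1 v hv => simp at h
  | case2 i h1 hv ih =>
      intro m hm1 hm2
      rcases Nat.eq_or_lt_of_le (Nat.succ_le_of_lt hm1) with he | hl
      · rw [← he]; exact hv
      · exact ih h m hl hm2
  | case3 i h1 => intro m hm1 hm2; omega

-- lookup succeeds exactly on the keys of d
theorem pvLookup_isSome_iff (d : List (String × List String)) (w : List Char) :
    (pvLookup d w).isSome ↔ ∃ p ∈ d, p.1.toList = w := by
  induction d with
  | nil => simp [pvLookup]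
  | cons p rest ih =>
      obtain ⟨k, v⟩ := p
      by_cases hk : k.toList = w
      · simp [pvLookup, hk]
      · simp [pvLookup, hk, ih]

-- the common reference semantics: emit the shortest dictionary-key prefix, recurse on the rest
def pvRef (d : List (String × List String)) (s : List Char) : List (List String) :=
  match hf : pvFirst d s 0 with
  | none => []
  | some j =>
      match pvLookup d (s.take j) with
      | none => []
      | some vs => (String.ofList (s.take j) :: vs) :: pvRef d (s.drop j)
  termination_by s.length
  decreasing_by
    have := pvFirst_some_spec d s 0 j hf
    simp only [List.length_drop]; omega

theorem pvRef_eq_nil (d : List (String × List String)) (s : List Char)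
    (hf : pvFirst d s 0 = none) : pvRef d s = [] := by
  rw [pvRef]
  split
  · rfl
  · next j heq => rw [hf] at heq; cases heq

theorem pvRef_eq_cons (d : List (String × List String)) (s : List Char) (j : Nat)
    (vs : List String) (hf : pvFirst d s 0 = some j) (hv : pvLookup d (s.take j) = some vs) :
    pvRef d s = (String.ofList (s.take j) :: vs) :: pvRef d (s.drop j) := by
  rw [pvRef]
  split
  · next heq => rw [hf] at heq; cases heq
  · next j' heq =>
      rw [hf] at heq; cases heq
      rw [hv]

-- one round of A's loop: from position i with word = s.take i it reaches the first hit (if any)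
theorem tokA_step (d : List (String × List String)) (s : List Char) (i : Nat)
    (acc : List (List String)) :
    pvTokA d s i (s.take i) acc =
      match pvFirst d s i with
      | none => acc
      | some j =>
          match pvLookup d (s.take j) with
          | none => acc
          | some vs => pvTokA d (s.drop j) 0 [] (acc ++ [String.ofList (s.take j) :: vs]) := by
  fun_induction pvFirst d s i with
  | case1 i h1 v hv =>
      rw [pvTokA]
      rw [dif_pos h1]
      have ht : s.take i ++ [s[i]] = s.take (i + 1) := by
        rw [List.take_add, List.take_one_drop_eq_of_lt_length h1]; rfl
      simp only [ht, hv]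
  | case2 i h1 hv ih =>
      rw [pvTokA]
      rw [dif_pos h1]
      have ht : s.take i ++ [s[i]] = s.take (i + 1) := by
        rw [List.take_add, List.take_one_drop_eq_of_lt_length h1]; rfl
      simp only [ht, hv]
      exact ih
  | case3 i h1 =>
      rw [pvTokA]
      rw [dif_neg h1]

theorem tokA_eq_ref (d : List (String × List String)) (s : List Char) :
    ∀ acc : List (List String), pvTokA d s 0 [] acc = acc ++ pvRef d s := by
  fun_induction pvRef d s with
  | case1 s hf =>
      intro acc
      have := tokA_step d s 0 acc
      simp only [List.take_zero] at this
      rw [this, hf, List.append_nil]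
  | case2 s j hf hv =>
      exfalso
      have := (pvFirst_some_spec d s 0 j hf).2.2.1
      rw [hv] at this; simp at this
  | case3 s j hf vs hv ih =>
      intro acc
      have := tokA_step d s 0 acc
      simp only [List.take_zero] at this
      rw [this, hf]
      simp only [hv]
      rw [ih]
      simp

theorem key_mem_iff (d : List (String × List String)) (keys : List String)
    (hkeys : keys = PySem.List.sorted ((d.map Prod.fst).filter (fun k => !k.toList.isEmpty))
      (fun k => k.toList.length) false) (k : String) :
    k ∈ keys ↔ k ∈ d.map Prod.fst ∧ k.toList ≠ [] := by
  subst hkeys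
  rw [PySem.List.mem_sorted, List.mem_filter]
  simp

theorem findkeys_none (d : List (String × List String)) (keys : List String)
    (hk : ∀ k ∈ keys, k.toList ≠ [])
    (hkeys : keys = PySem.List.sorted ((d.map Prod.fst).filter (fun k => !k.toList.isEmpty))
      (fun k => k.toList.length) false)
    (rest : List Char) (hf : pvFirst d rest 0 = none) :
    keys.find? (fun k => PySem.Chars.startswith rest k.toList) = none := by
  rw [List.find?_eq_none]
  intro k hkm hp
  have hpre : k.toList <+: rest := (PySem.Chars.startswith_iff _ _).mp hp
  have hne := hk k hkm
  have hmem : k ∈ d.map Prod.fst := ((key_mem_iff d keys hkeys k).mp hkm).1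
  have hlen1 : 1 ≤ k.toList.length := by
    cases hcl : k.toList with
    | nil => exact absurd hcl hne
    | cons a l => simp
  have hlen2 : k.toList.length ≤ rest.length := hpre.length_le
  have htake : rest.take k.toList.length = k.toList := (List.prefix_iff_eq_take.mp hpre).symm
  have hsome : (pvLookup d (rest.take k.toList.length)).isSome := by
    rw [htake, pvLookup_isSome_iff]
    obtain ⟨p, hpd, hpk⟩ := List.mem_map.mp hmem
    exact ⟨p, hpd, by rw [hpk]⟩
  rw [pvFirst_none_spec d rest 0 hf _ (by omega) hlen2] at hsome
  simp at hsome

theorem findkeys_some (d : List (String × List String)) (keys : List String)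
    (hk : ∀ k ∈ keys, k.toList ≠ [])
    (hkeys : keys = PySem.List.sorted ((d.map Prod.fst).filter (fun k => !k.toList.isEmpty))
      (fun k => k.toList.length) false)
    (rest : List Char) (j : Nat) (hf : pvFirst d rest 0 = some j) :
    ∃ k, keys.find? (fun k => PySem.Chars.startswith rest k.toList) = some k ∧
      k.toList = rest.take j := by
  obtain ⟨hj0, hjlen, hlsome, hmin⟩ := pvFirst_some_spec d rest 0 j hf
  obtain ⟨p, hpd, hpw⟩ := (pvLookup_isSome_iff d _).mp hlsome
  have hlen_take : (rest.take j).length = j := by rw [List.length_take]; omega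
  have hne : p.1.toList ≠ [] := by
    rw [hpw]
    intro hnil
    rw [hnil] at hlen_take
    simp at hlen_take
    omega
  have hkm : p.1 ∈ keys := (key_mem_iff d keys hkeys p.1).mpr
    ⟨List.mem_map.mpr ⟨p, hpd, rfl⟩, hne⟩
  have hpred : PySem.Chars.startswith rest p.1.toList = true :=
    (PySem.Chars.startswith_iff _ _).mpr (by rw [hpw]; exact List.take_prefix j rest)
  have hex : (keys.find? (fun k => PySem.Chars.startswith rest k.toList)).isSome :=
    List.find?_isSome.mpr ⟨p.1, hkm, hpred⟩
  obtain ⟨k, hfind⟩ := Option.isSome_iff_exists.mp hex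
  refine ⟨k, hfind, ?_⟩
  obtain ⟨hkp, l₁, l₂, hsplit, hbefore⟩ := List.find?_eq_some_iff_append.mp hfind
  have hkpre : k.toList <+: rest := (PySem.Chars.startswith_iff _ _).mp hkp
  have hktake : rest.take k.toList.length = k.toList := (List.prefix_iff_eq_take.mp hkpre).symm
  have hkne : k.toList ≠ [] := hk k (List.mem_of_find?_eq_some hfind)
  have hk1 : 1 ≤ k.toList.length := by
    cases hcl : k.toList with
    | nil => exact absurd hcl hkne
    | cons a l => simp
  have hklen2 : k.toList.length ≤ rest.length := hkpre.length_le
  -- minimality of j: the dictionary has no key prefix shorter than j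
  have hjle : j ≤ k.toList.length := by
    by_contra hlt
    push_neg at hlt
    have hkd : k ∈ d.map Prod.fst := ((key_mem_iff d keys hkeys k).mp
      (List.mem_of_find?_eq_some hfind)).1
    obtain ⟨q, hqd, hqk⟩ := List.mem_map.mp hkd
    have : (pvLookup d (rest.take k.toList.length)).isSome := by
      rw [hktake, pvLookup_isSome_iff]
      exact ⟨q, hqd, by rw [hqk]⟩
    rw [hmin k.toList.length (by omega) hlt] at this
    simp at this
  -- sortedness: the found key is no longer than p.1, whose length is j
  have pw : keys.Pairwise (fun a b => a.toList.length ≤ b.toList.length) := by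
    have := PySem.List.sorted_pairwise ((d.map Prod.fst).filter (fun k => !k.toList.isEmpty))
      (fun k => k.toList.length) -- false?
    rw [hkeys]
    exact this
  have hjge : k.toList.length ≤ j := by
    rw [hsplit] at pw
    rcases (List.mem_append.mp (hsplit ▸ hkm)) with hin1 | hin2
    · have := hbefore p.1 hin1
      rw [hpred] at this
      simp at this
    · rcases List.mem_cons.mp hin2 with heq | hin2'
      · rw [← heq, hpw, hlen_take]
      · have := (List.pairwise_cons.mp (List.pairwise_append.mp pw).2.1).1 p.1 hin2'
        rw [hpw, hlen_take] at this
        exact this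
  have hlj : k.toList.length = j := by omega
  rw [← hlj]
  exact hktake.symm


theorem tokB_eq_ref (d : List (String × List String)) (keys : List String)
    (hk : ∀ k ∈ keys, k.toList ≠ [])
    (hkeys : keys = PySem.List.sorted ((d.map Prod.fst).filter (fun k => !k.toList.isEmpty))
      (fun k => k.toList.length) false)
    (s : List Char) (start : Nat) (acc : List (List String)) :
    pvTokB d keys hk s start acc = acc ++ pvRef d (s.drop start) := by
  have hnil : pvRef d [] = [] := pvRef_eq_nil d [] (by rw [pvFirst]; simp)
  have main : ∀ (n start : Nat) (acc : List (List String)), s.length - start ≤ n →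
      pvTokB d keys hk s start acc = acc ++ pvRef d (s.drop start) := by
    intro n
    induction n with
    | zero =>
        intro start acc hle
        rw [pvTokB, dif_neg (by omega)]
        rw [List.drop_eq_nil_of_le (by omega), hnil, List.append_nil]
    | succ n ihn =>
        intro start acc hle
        by_cases h : start < s.length
        · rw [pvTokB, dif_pos h]
          cases hf : pvFirst d (s.drop start) 0 with
          | none =>
              have hfind := findkeys_none d keys hk hkeys _ hf
              split
              · next k heq => rw [hfind] at heq; cases heq
              · rw [pvRef_eq_nil d _ hf, List.append_nil]
          | some j =>
              obtain ⟨k, hfind, hktake⟩ := findkeys_some d keys hk hkeys _ j hf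
              obtain ⟨hj0, hjlen, hlsome, _⟩ := pvFirst_some_spec d (s.drop start) 0 j hf
              obtain ⟨vs, hv⟩ := Option.isSome_iff_exists.mp hlsome
              split
              · next k' heq =>
                  rw [hfind] at heq
                  cases heq
                  have hklen : k.toList.length = j := by
                    rw [hktake, List.length_take]; omega
                  have hrec := ihn (start + k.toList.length)
                    (acc ++ [k :: (pvLookup d k.toList).getD []]) (by omega)
                  rw [hrec]
                  have hdd : s.drop (start + k.toList.length) = (s.drop start).drop j := by
                    rw [List.drop_drop]; congr 1; omega
                  rw [hdd]
                  rw [pvRef_eq_cons d (s.drop start) j vs hf hv]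
                  have hkof : k = String.ofList ((s.drop start).take j) := by
                    rw [← hktake, String.ofList_toList]
                  have hvk : pvLookup d k.toList = some vs := by rw [hktake]; exact hv
                  rw [hvk, ← hkof]
                  simp
              · next heq => rw [hfind] at heq; cases heq
        · rw [pvTokB, dif_neg h]
          rw [List.drop_eq_nil_of_le (by omega), hnil, List.append_nil]
  exact main (s.length - start) start acc le_rfl

-- ===== VERDICT (by name: the statement is the Claim_ definition above) =====
theorem simple_tokenizer_spec : Claim_equal_simple_tokenizer := by
  intro th_dict sentence _
  show simple_tokenizer th_dict sentence = simple_tokenizer_alt th_dict sentence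
  unfold simple_tokenizer simple_tokenizer_alt
  rw [tokA_eq_ref _ _ _, tokB_eq_ref th_dict _ _ rfl]
  simp
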